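-- pv_equiv track=rewrite | github.com/MarkCBell/bundles | bundler/relators.py | shuffle_relators
-- ===== SOURCE A (Python) =====
-- def inverse(w):
-- 	return w[::-1].swapcase()
--
-- def shuffle_relators(relators):
-- 	shuffle_relator = lambda a,b: set((a[i:]+inverse(b[len(b)-i:]),inverse(a[:i])+b[:len(b)-i]) for i in range(len(a)))
--
-- 	R = set(relators)
-- 	S = set((x,y) for (a,b) in R for (x,y) in shuffle_relator(a,b) if all(m not in x for (m,n) in R))
-- 	R = R.union(set((a,b) for (a,b) in S if all(x not in a or (x,y) == (a,b) for (x,y) in S)))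
-- 	R = R.union(set((inverse(a),inverse(b)) for (a,b) in R))
-- 	R = R.union(set((b,a) for (a,b) in R))
--
-- 	return list(R)
-- ===== SOURCE B (Python) =====
-- def shuffle_relators(relators):
-- 	def inverse(w):
-- 		return w[::-1].swapcase()
--
-- 	END = None  # terminal marker key in trie nodes
--
-- 	def trie_insert(t, word, terminal):
-- 		# walk/extend the trie along word, then record the terminal datum
-- 		for ch in word:
-- 			t = t.setdefault(ch, {})
-- 		if terminal is True:
-- 			t[END] = True
-- 		else:
-- 			t.setdefault(END, []).append(terminal)
--
-- 	def has_match_at(t, s, i):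
-- 		# does some word of the bool-trie t start at position i of s?
-- 		node = t
-- 		while True:
-- 			if END in node:
-- 				return True
-- 			if i >= len(s):
-- 				return False
-- 			node = node.get(s[i])
-- 			if node is None:
-- 				return False
-- 			i += 1
--
-- 	def occurs(t, s):
-- 		# is some word of t a substring of s? (one trie walk per start position)
-- 		return any(has_match_at(t, s, i) for i in range(len(s) + 1))
--
-- 	def matches_only(t, s, ab):
-- 		# every pair stored in the pair-trie t whose word occurs in s equals ab
-- 		for i in range(len(s) + 1):
-- 			node = t
-- 			j = i
-- 			while node is not None:
-- 				for p in node.get(END, ()):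
-- 					if p != ab:
-- 						return False
-- 				if j >= len(s):
-- 					break
-- 				node = node.get(s[j])
-- 				j += 1
-- 		return True
--
-- 	R = set(relators)
-- 	firsts_trie = {}
-- 	for (m, n) in R:
-- 		trie_insert(firsts_trie, m, True)
-- 	S = set()
-- 	for (a, b) in R:
-- 		n = len(b)
-- 		for i in range(len(a)):
-- 			x = a[i:] + inverse(b[n - i:])
-- 			if not occurs(firsts_trie, x):
-- 				S.add((x, inverse(a[:i]) + b[:n - i]))
-- 	pair_trie = {}
-- 	for xy in S:
-- 		trie_insert(pair_trie, xy[0], xy)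
-- 	keep = set()
-- 	for ab in S:
-- 		if matches_only(pair_trie, ab[0], ab):
-- 			keep.add(ab)
-- 	R |= keep
-- 	R |= set((inverse(a), inverse(b)) for (a, b) in R)
-- 	R |= set((b, a) for (a, b) in R)
-- 	return list(R)
-- ===== Notes on version B (the rewrite author's own statement) =====
-- stated objective: faster
-- what changed: Replaces A's naive per-pattern substring scans ('m not in x' over every relator, and 'x not in a' over every element of S) by trie-based multi-pattern matching: the relator firsts are inserted once into a character trie (and S's pairs into a pair-payload trie) and each candidate is tested by one trie walk per start position, removing the per-pattern rescans.
import Mathlib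
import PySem

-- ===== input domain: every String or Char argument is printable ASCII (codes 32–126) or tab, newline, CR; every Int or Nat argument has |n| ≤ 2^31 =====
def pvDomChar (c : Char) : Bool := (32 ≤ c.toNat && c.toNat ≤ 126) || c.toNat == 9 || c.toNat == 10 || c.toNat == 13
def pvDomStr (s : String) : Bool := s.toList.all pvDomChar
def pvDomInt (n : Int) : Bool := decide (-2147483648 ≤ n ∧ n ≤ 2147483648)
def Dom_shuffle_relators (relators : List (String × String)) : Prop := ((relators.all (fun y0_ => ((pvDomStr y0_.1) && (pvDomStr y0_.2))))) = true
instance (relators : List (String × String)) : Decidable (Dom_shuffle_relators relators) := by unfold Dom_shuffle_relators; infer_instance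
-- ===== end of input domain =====

-- B replaces A's per-pattern substring scans by trie-based multi-pattern matching:
-- the relator firsts (resp. the pairs of S) are inserted once into a character trie and
-- each candidate string is tested by one trie walk per start position (objective:
-- faster, measured; the return value is a Python set listed in hash
-- order, modelled here in insertion order).

-- shared helper: the module-level 'inverse(w) = w[::-1].swapcase()' used verbatim by both
-- Pythons. swapcase is per-code-point case swap — exact on the ASCII domain;
-- w[::-1] = reverse (PySem.Str.slice?_none_none_neg_one); '+' on str = concatenation of code points.
def pvSwapChar (c : Char) : Char :=
  if PySem.Str.isupper c then PySem.Chars.lowerChar c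
  else if PySem.Str.islower c then PySem.Chars.upperChar c
  else c

def pvInverse (s : String) : String :=
  String.ofList ((s.toList.reverse).map pvSwapChar)

def pvCat (s t : String) : String :=
  String.ofList (s.toList ++ t.toList)

-- ===== PORT A =====
def shuffle_relators (relators : List (String × String)) : List (String × String) :=
  let R : PySem.Set (String × String) := PySem.Set.ofList relators
  let shuffle_relator : String → String → PySem.Set (String × String) := fun a b =>
    PySem.Set.ofList ((PySem.List.pyRange 0 (PySem.Str.len a)).map (fun i =>
      (pvCat (PySem.Str.slice a (some i) none)
             (pvInverse (PySem.Str.slice b (some (PySem.Str.len b - i)) none)),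
       pvCat (pvInverse (PySem.Str.slice a none (some i)))
             (PySem.Str.slice b none (some (PySem.Str.len b - i))))))
  let S : PySem.Set (String × String) :=
    R.foldl (fun s ab =>
      (shuffle_relator ab.1 ab.2).foldl (fun s xy =>
        if R.all (fun mn => !(PySem.Str.isIn mn.1 xy.1)) then PySem.Set.add s xy else s) s)
      PySem.Set.empty
  let R2 := PySem.Set.union R (PySem.Set.ofList (S.filter (fun ab =>
      S.all (fun xy => !(PySem.Str.isIn xy.1 ab.1) || (xy == ab)))))
  let R3 := PySem.Set.union R2 (PySem.Set.ofList (R2.map (fun ab => (pvInverse ab.1, pvInverse ab.2))))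
  let R4 := PySem.Set.union R3 (PySem.Set.ofList (R3.map (fun ab => (ab.2, ab.1))))
  R4

-- ===== PORT B =====
-- Source B's trie: a Python dict-of-dicts, ported hand-written (PySem has no trie) as a
-- first-child/next-sibling tree; the END entry of a node is the `val` field (absent =
-- the default d). Children are only looked up by character, never enumerated, so the
-- sibling chain (kept in insertion order, appended at the end like dict.setdefault)
-- is an exact port of the dict.
inductive PvTrie (α : Type) where
  | nil : PvTrie α
  | node : Char → α → PvTrie α → PvTrie α → PvTrie α

-- fresh branch for the remaining word (dict.setdefault creating new nodes)
def pvFresh {α : Type} (d : α) (upd : α → α) : Char → List Char → PvTrie α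
  | c, [] => .node c (upd d) .nil .nil
  | c, c2 :: cs => .node c d (pvFresh d upd c2 cs) .nil

-- trie_insert's walk along the sibling chain / down the children
def pvInsertC {α : Type} (d : α) (upd : α → α) : Char → List Char → PvTrie α → PvTrie α
  | c, cs, .nil => pvFresh d upd c cs
  | c, cs, .node c' v ch sib =>
      if c' = c then
        match cs with
        | [] => .node c' (upd v) ch sib
        | c2 :: cs2 => .node c' v (pvInsertC d upd c2 cs2 ch) sib
      else .node c' v ch (pvInsertC d upd c cs sib)

-- trie_insert(t, word, ·) on a rooted trie (root value, root children)
def pvInsertT {α : Type} (d : α) (upd : α → α) (w : List Char) (r : α × PvTrie α) : α × PvTrie α :=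
  match w with
  | [] => (upd r.1, r.2)
  | c :: cs => (r.1, pvInsertC d upd c cs r.2)

-- node.get(ch) on the sibling chain
def pvFindChild {α : Type} : Char → PvTrie α → Option (α × PvTrie α)
  | _, .nil => none
  | c, .node c' v ch sib => if c' = c then some (v, ch) else pvFindChild c sib

-- the while-loop of has_match_at after the first END test
def pvMatchWalk {α : Type} (isT : α → Bool) : PvTrie α → List Char → Bool
  | _, [] => false
  | t, c :: cs =>
      match pvFindChild c t with
      | none => false
      | some (v, ch) => if isT v then true else pvMatchWalk isT ch cs

-- has_match_at(t, s, i) on the suffix of s starting at i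
def pvMatchFrom {α : Type} (isT : α → Bool) (r : α × PvTrie α) (l : List Char) : Bool :=
  if isT r.1 then true else pvMatchWalk isT r.2 l

-- occurs(t, s); i drawn from range(len(s)+1) is nonnegative, so s.toList.drop i.toNat
-- is exactly the suffix the Python index walk reads
def pvOccurs (r : Bool × PvTrie Bool) (s : String) : Bool :=
  (PySem.List.pyRange 0 (PySem.Str.len s + 1)).any (fun i => pvMatchFrom id r (s.toList.drop i.toNat))

-- the while-loop of matches_only for one start position
def pvGoodWalk (ab : String × String) : PvTrie (List (String × String)) → List Char → Bool
  | _, [] => true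
  | t, c :: cs =>
      match pvFindChild c t with
      | none => true
      | some (v, ch) => v.all (fun p => p == ab) && pvGoodWalk ab ch cs

def pvGoodFrom (ab : String × String) (r : List (String × String) × PvTrie (List (String × String)))
    (l : List Char) : Bool :=
  r.1.all (fun p => p == ab) && pvGoodWalk ab r.2 l

-- matches_only(t, s, ab)
def pvMatchesOnly (r : List (String × String) × PvTrie (List (String × String)))
    (s : String) (ab : String × String) : Bool :=
  (PySem.List.pyRange 0 (PySem.Str.len s + 1)).all (fun i => pvGoodFrom ab r (s.toList.drop i.toNat))

-- the firsts trie built from R (insert m with terminal True)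
def pvBuildFirsts (R : List (String × String)) : Bool × PvTrie Bool :=
  R.foldl (fun t mn => pvInsertT false (fun _ => true) mn.1.toList t) (false, .nil)

-- the pair trie built from S (insert x with the pair appended to the terminal list)
def pvBuildPairs (S : List (String × String)) :
    List (String × String) × PvTrie (List (String × String)) :=
  S.foldl (fun t xy => pvInsertT [] (fun l => l ++ [xy]) xy.1.toList t) ([], .nil)

def shuffle_relators_alt (relators : List (String × String)) : List (String × String) :=
  let R : PySem.Set (String × String) := PySem.Set.ofList relators
  let ft := pvBuildFirsts R
  let S : PySem.Set (String × String) :=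
    R.foldl (fun s ab =>
      (PySem.List.pyRange 0 (PySem.Str.len ab.1)).foldl (fun s i =>
        let x := pvCat (PySem.Str.slice ab.1 (some i) none)
                       (pvInverse (PySem.Str.slice ab.2 (some (PySem.Str.len ab.2 - i)) none))
        if !(pvOccurs ft x) then
          PySem.Set.add s (x, pvCat (pvInverse (PySem.Str.slice ab.1 none (some i)))
                                    (PySem.Str.slice ab.2 none (some (PySem.Str.len ab.2 - i))))
        else s) s)
      PySem.Set.empty
  let pt := pvBuildPairs S
  let keep : PySem.Set (String × String) :=
    S.foldl (fun k ab => if pvMatchesOnly pt ab.1 ab then PySem.Set.add k ab else k)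
      PySem.Set.empty
  let R2 := PySem.Set.union R keep
  let R3 := PySem.Set.union R2 (PySem.Set.ofList (R2.map (fun ab => (pvInverse ab.1, pvInverse ab.2))))
  let R4 := PySem.Set.union R3 (PySem.Set.ofList (R3.map (fun ab => (ab.2, ab.1))))
  R4

-- ===== PRECONDITION & SPEC =====
def Spec_shuffle_relators (relators : List (String × String)) (out : List (String × String)) : Prop := out = shuffle_relators_alt relators
instance (relators : List (String × String)) (out : List (String × String)) : Decidable (Spec_shuffle_relators relators out) := by unfold Spec_shuffle_relators; infer_instance

-- ===== CLAIM (what is proved, stated in full; the proofs are below) =====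
def Claim_equal_shuffle_relators : Prop := ∀ (relators : List (String × String)), Dom_shuffle_relators relators → Spec_shuffle_relators relators (shuffle_relators relators)

-- ===== LEMMAS AND PROOFS =====

-- proof-only lookup: the value stored in the trie at word w (d if absent)
def pvLookupC {α : Type} (d : α) : Char → List Char → PvTrie α → α
  | _, _, .nil => d
  | c, cs, .node c' v ch sib =>
      if c' = c then
        match cs with
        | [] => v
        | c2 :: cs2 => pvLookupC d c2 cs2 ch
      else pvLookupC d c cs sib

def pvLookupT {α : Type} (d : α) (w : List Char) (r : α × PvTrie α) : α :=
  match w with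
  | [] => r.1
  | c :: cs => pvLookupC d c cs r.2

theorem pv_lookup_fresh {α : Type} (d : α) (upd : α → α) (c : Char) (cs : List Char)
    (c' : Char) (cs' : List Char) :
    pvLookupC d c' cs' (pvFresh d upd c cs)
      = if c' = c ∧ cs' = cs then upd d else d := by
  induction cs generalizing c c' cs' with
  | nil =>
    by_cases h : c = c'
    · subst h
      cases cs' <;> simp [pvFresh, pvLookupC]
    · cases cs' <;> simp [pvFresh, pvLookupC, h, Ne.symm h]
  | cons c2 cs2 ih =>
    by_cases h : c = c'
    · subst h
      cases cs' with
      | nil => simp [pvFresh, pvLookupC]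
      | cons c3 cs3 => simp [pvFresh, pvLookupC, ih]
    · cases cs' <;> simp [pvFresh, pvLookupC, h, Ne.symm h]

theorem pv_lookup_insC {α : Type} (d : α) (upd : α → α) (c : Char) (cs : List Char)
    (c' : Char) (cs' : List Char) (t : PvTrie α) :
    pvLookupC d c' cs' (pvInsertC d upd c cs t)
      = if c' = c ∧ cs' = cs then upd (pvLookupC d c' cs' t) else pvLookupC d c' cs' t := by
  induction t generalizing c cs c' cs' with
  | nil =>
    show pvLookupC d c' cs' (pvFresh d upd c cs) = _
    rw [pv_lookup_fresh]
    have : pvLookupC d c' cs' (.nil : PvTrie α) = d := rfl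
    rw [this]
  | node c0 v ch sib ihch ihsib =>
    by_cases h1 : c0 = c
    · subst h1
      cases cs with
      | nil =>
        by_cases h2 : c0 = c'
        · subst h2
          cases cs' <;> simp [pvInsertC, pvLookupC]
        · cases cs' <;> simp [pvInsertC, pvLookupC, h2, Ne.symm h2]
      | cons c2 cs2 =>
        by_cases h2 : c0 = c'
        · subst h2
          cases cs' with
          | nil => simp [pvInsertC, pvLookupC]
          | cons c3 cs3 => simp [pvInsertC, pvLookupC, ihch]
        · cases cs' <;> simp [pvInsertC, pvLookupC, h2, Ne.symm h2]
    · by_cases h2 : c0 = c'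
      · subst h2
        cases cs' <;> simp [pvInsertC, pvLookupC, h1]
      · simp [pvInsertC, pvLookupC, h1, h2, ihsib]


theorem pv_lookup_insT {α : Type} (d : α) (upd : α → α) (w w' : List Char) (r : α × PvTrie α) :
    pvLookupT d w' (pvInsertT d upd w r)
      = if w' = w then upd (pvLookupT d w' r) else pvLookupT d w' r := by
  cases w with
  | nil => cases w' <;> simp [pvInsertT, pvLookupT]
  | cons c cs =>
    cases w' with
    | nil => simp [pvInsertT, pvLookupT]
    | cons c' cs' =>
      simp only [pvInsertT, pvLookupT, pv_lookup_insC]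
      split_ifs with h h2 h2 <;> simp_all

theorem pv_lookup_nilroot {α : Type} (d : α) (w : List Char) :
    pvLookupT d w ((d, PvTrie.nil) : α × PvTrie α) = d := by
  cases w <;> rfl

theorem pv_lookup_buildFirsts (R : List (String × String)) (u : List Char) :
    pvLookupT false u (pvBuildFirsts R) = R.any (fun mn => decide (mn.1.toList = u)) := by
  suffices h : ∀ (r : Bool × PvTrie Bool),
      pvLookupT false u (R.foldl (fun t mn => pvInsertT false (fun _ => true) mn.1.toList t) r)
        = (pvLookupT false u r || R.any (fun mn => decide (mn.1.toList = u))) by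
    rw [pvBuildFirsts, h, pv_lookup_nilroot]; simp
  induction R with
  | nil => simp
  | cons mn R ih =>
    intro r
    simp only [List.foldl_cons, List.any_cons]
    rw [ih, pv_lookup_insT]
    by_cases h : u = mn.1.toList
    · simp [h]
    · simp [h, Ne.symm h]

theorem pv_lookup_buildPairs (S : List (String × String)) (u : List Char) :
    pvLookupT [] u (pvBuildPairs S) = S.filter (fun xy => decide (xy.1.toList = u)) := by
  suffices h : ∀ (r : List (String × String) × PvTrie (List (String × String))),
      pvLookupT [] u (S.foldl (fun t xy => pvInsertT [] (fun l => l ++ [xy]) xy.1.toList t) r)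
        = pvLookupT [] u r ++ S.filter (fun xy => decide (xy.1.toList = u)) by
    rw [pvBuildPairs, h, pv_lookup_nilroot]; simp
  induction S with
  | nil => simp
  | cons xy S ih =>
    intro r
    simp only [List.foldl_cons, List.filter_cons]
    rw [ih, pv_lookup_insT]
    by_cases h : u = xy.1.toList
    · simp [h]
    · simp [h, Ne.symm h]

-- node.get relation between lookup and findChild
theorem pv_lookupC_find {α : Type} (d : α) (c : Char) (cs : List Char) (t : PvTrie α) :
    pvLookupC d c cs t
      = match pvFindChild c t with
        | none => d
        | some (v, ch) => match cs with
          | [] => v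
          | c2 :: cs2 => pvLookupC d c2 cs2 ch := by
  induction t with
  | nil => cases cs <;> rfl
  | node c0 v ch sib _ ihsib =>
    by_cases h : c0 = c
    · cases cs <;> simp [pvLookupC, pvFindChild, h]
    · simp [pvLookupC, pvFindChild, h, ihsib]

theorem pv_matchWalk_iff {α : Type} (isT : α → Bool) (d : α) (hd : isT d = false)
    (t : PvTrie α) (l : List Char) :
    pvMatchWalk isT t l = true
      ↔ ∃ c cs, (c :: cs) <+: l ∧ isT (pvLookupC d c cs t) = true := by
  induction l generalizing t with
  | nil => simp [pvMatchWalk]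
  | cons c0 l' ih =>
    have hpre : ∀ (c : Char) (cs : List Char),
        (c :: cs) <+: (c0 :: l') ↔ c = c0 ∧ cs <+: l' := by
      intro c cs; constructor
      · intro h; rcases h with ⟨u, hu⟩
        injection hu with h1 h2; exact ⟨h1, ⟨u, h2⟩⟩
      · rintro ⟨rfl, ⟨u, hu⟩⟩; exact ⟨u, by rw [List.cons_append, hu]⟩
    cases hfc : pvFindChild c0 t with
    | none =>
      simp only [pvMatchWalk, hfc, Bool.false_eq_true, false_iff]
      rintro ⟨c, cs, hp, hT⟩
      rw [hpre] at hp
      rw [pv_lookupC_find, hp.1, hfc] at hT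
      rw [hd] at hT; exact absurd hT (by simp)
    | some vch =>
      obtain ⟨v, ch⟩ := vch
      simp only [pvMatchWalk, hfc]
      constructor
      · intro h
        by_cases hv : isT v = true
        · exact ⟨c0, [], by simp, by rw [pv_lookupC_find, hfc]; exact hv⟩
        · rw [if_neg hv] at h
          obtain ⟨c, cs, hp, hT⟩ := (ih ch).mp h
          exact ⟨c0, c :: cs, (hpre _ _).mpr ⟨rfl, hp⟩,
            by rw [pv_lookupC_find, hfc]; exact hT⟩
      · rintro ⟨c, cs, hp, hT⟩
        rw [hpre] at hp
        rw [pv_lookupC_find, hp.1, hfc] at hT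
        cases cs with
        | nil => simp [hT]
        | cons c2 cs2 =>
          by_cases hv : isT v = true
          · simp [hv]
          · rw [if_neg hv]
            exact (ih ch).mpr ⟨c2, cs2, hp.2, hT⟩

theorem pv_matchFrom_iff {α : Type} (isT : α → Bool) (d : α) (hd : isT d = false)
    (r : α × PvTrie α) (l : List Char) :
    pvMatchFrom isT r l = true
      ↔ ∃ p, p <+: l ∧ isT (pvLookupT d p r) = true := by
  rw [pvMatchFrom]
  by_cases h : isT r.1 = true
  · simp only [h, if_true, true_iff]
    exact ⟨[], List.nil_prefix, h⟩
  · rw [if_neg h, pv_matchWalk_iff isT d hd]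
    constructor
    · rintro ⟨c, cs, hp, hT⟩; exact ⟨c :: cs, hp, hT⟩
    · rintro ⟨p, hp, hT⟩
      cases p with
      | nil => exact absurd hT h
      | cons c cs => exact ⟨c, cs, hp, hT⟩

-- infix ↔ prefix of a suffix, with the cut point bounded
theorem pv_infix_iff (w l : List Char) :
    w <:+: l ↔ ∃ n : Nat, n ≤ l.length ∧ w <+: l.drop n := by
  constructor
  · rintro ⟨s, t, rfl⟩
    refine ⟨s.length, by simp, ?_⟩
    have hd : (s ++ w ++ t).drop s.length = w ++ t := by
      rw [List.append_assoc]; exact List.drop_left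
    rw [hd]; exact ⟨t, rfl⟩
  · rintro ⟨n, _, ⟨t, ht⟩⟩
    exact ⟨l.take n, t, by rw [List.append_assoc, ht, List.take_append_drop]⟩

theorem pv_occurs_iff (R : List (String × String)) (s : String) :
    pvOccurs (pvBuildFirsts R) s = true
      ↔ ∃ mn ∈ R, PySem.Str.isIn mn.1 s = true := by
  rw [pvOccurs, List.any_eq_true]
  constructor
  · rintro ⟨i, hi, hm⟩
    obtain ⟨p, hp, hT⟩ := (pv_matchFrom_iff id false rfl _ _).mp hm
    rw [pv_lookup_buildFirsts] at hT
    simp only [id_eq, List.any_eq_true, decide_eq_true_eq] at hT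
    obtain ⟨mn, hmn, he⟩ := hT
    refine ⟨mn, hmn, ?_⟩
    rw [PySem.Str.isIn_iff_infix, pv_infix_iff]
    have hlen := (PySem.List.mem_pyRange_one.mp hi).2
    have h0 := (PySem.List.mem_pyRange_one.mp hi).1
    simp only [PySem.Str.len_eq] at hlen
    have hL : s.toList.length = s.length := by simp
    exact ⟨i.toNat, by omega, he ▸ hp⟩
  · rintro ⟨mn, hmn, hin⟩
    rw [PySem.Str.isIn_iff_infix, pv_infix_iff] at hin
    obtain ⟨n, hn, hp⟩ := hin
    have hL : s.toList.length = s.length := by simp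
    refine ⟨(n : Int), PySem.List.mem_pyRange_one.mpr
      ⟨by positivity, by simp only [PySem.Str.len_eq]; push_cast; omega⟩, ?_⟩
    rw [pv_matchFrom_iff id false rfl]
    refine ⟨mn.1.toList, by simpa using hp, ?_⟩
    rw [pv_lookup_buildFirsts]
    simp only [id_eq, List.any_eq_true, decide_eq_true_eq]
    exact ⟨mn, hmn, rfl⟩

theorem pv_goodWalk_iff (ab : String × String) (t : PvTrie (List (String × String)))
    (l : List Char) :
    pvGoodWalk ab t l = true
      ↔ ∀ c cs, (c :: cs) <+: l → ∀ q ∈ pvLookupC [] c cs t, q = ab := by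
  induction l generalizing t with
  | nil =>
    simp only [pvGoodWalk, true_iff]
    intro c cs hp; exact absurd hp (by simp)
  | cons c0 l' ih =>
    have hpre : ∀ (c : Char) (cs : List Char),
        (c :: cs) <+: (c0 :: l') ↔ c = c0 ∧ cs <+: l' := by
      intro c cs; constructor
      · intro h; rcases h with ⟨u, hu⟩
        injection hu with h1 h2; exact ⟨h1, ⟨u, h2⟩⟩
      · rintro ⟨rfl, ⟨u, hu⟩⟩; exact ⟨u, by rw [List.cons_append, hu]⟩
    cases hfc : pvFindChild c0 t with
    | none =>
      simp only [pvGoodWalk, hfc, true_iff]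
      intro c cs hp q hq
      rw [hpre] at hp
      rw [pv_lookupC_find, hp.1, hfc] at hq
      exact absurd hq (by simp)
    | some vch =>
      obtain ⟨v, ch⟩ := vch
      simp only [pvGoodWalk, hfc]
      rw [Bool.and_eq_true, List.all_eq_true, ih]
      constructor
      · rintro ⟨hv, hrest⟩ c cs hp q hq
        rw [hpre] at hp
        rw [pv_lookupC_find, hp.1, hfc] at hq
        cases cs with
        | nil => simpa using hv q hq
        | cons c2 cs2 => exact hrest c2 cs2 hp.2 q hq
      · intro h
        constructor
        · intro q hq
          have := h c0 [] (by simp) q (by rw [pv_lookupC_find, hfc]; exact hq)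
          simp [this]
        · intro c cs hp q hq
          exact h c0 (c :: cs) ((hpre _ _).mpr ⟨rfl, hp⟩) q
            (by rw [pv_lookupC_find, hfc]; exact hq)

theorem pv_goodFrom_iff (ab : String × String)
    (r : List (String × String) × PvTrie (List (String × String))) (l : List Char) :
    pvGoodFrom ab r l = true
      ↔ ∀ p, p <+: l → ∀ q ∈ pvLookupT [] p r, q = ab := by
  rw [pvGoodFrom, Bool.and_eq_true, List.all_eq_true, pv_goodWalk_iff]
  constructor
  · rintro ⟨h0, h1⟩ p hp q hq
    cases p with
    | nil => simpa using h0 q hq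
    | cons c cs => exact h1 c cs hp q hq
  · intro h
    constructor
    · intro q hq
      have := h [] List.nil_prefix q hq
      simp [this]
    · intro c cs hp q hq
      exact h (c :: cs) hp q hq

theorem pv_matchesOnly_iff (S : List (String × String)) (s : String) (ab : String × String) :
    pvMatchesOnly (pvBuildPairs S) s ab = true
      ↔ ∀ xy ∈ S, PySem.Str.isIn xy.1 s = true → xy = ab := by
  rw [pvMatchesOnly, List.all_eq_true]
  constructor
  · intro h xy hxy hin
    rw [PySem.Str.isIn_iff_infix, pv_infix_iff] at hin
    obtain ⟨n, hn, hp⟩ := hin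
    have hmem : ((n : Int)) ∈ PySem.List.pyRange 0 (PySem.Str.len s + 1) 1 := by
      rw [PySem.List.mem_pyRange_one]
      refine ⟨by positivity, ?_⟩
      rw [PySem.Str.len_eq]; push_cast; omega
    have := (pv_goodFrom_iff ab _ _).mp (h _ hmem) xy.1.toList (by simpa using hp) xy ?_
    · exact this
    · rw [pv_lookup_buildPairs, List.mem_filter]
      exact ⟨hxy, by simp⟩
  · intro h i hi
    rw [pv_goodFrom_iff]
    intro p hp q hq
    rw [pv_lookup_buildPairs, List.mem_filter] at hq
    refine h q hq.1 ?_
    rw [PySem.Str.isIn_iff_infix, pv_infix_iff]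
    have hq1 : q.1.toList = p := by simpa using hq.2
    refine ⟨i.toNat, ?_, by rw [hq1]; exact hp⟩
    have h2 := (PySem.List.mem_pyRange_one.mp hi).2
    have h0 := (PySem.List.mem_pyRange_one.mp hi).1
    have hL : s.toList.length = s.length := by simp
    simp [PySem.Str.len_eq] at h2
    omega

-- the two stage predicates coincide
theorem pv_pred1_eq (R : List (String × String)) (x : String) :
    R.all (fun mn => !(PySem.Str.isIn mn.1 x))
      = !(pvOccurs (pvBuildFirsts R) x) := by
  rw [Bool.eq_iff_iff, List.all_eq_true, Bool.not_eq_true', ← Bool.not_eq_true,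
    pv_occurs_iff]
  push_neg
  constructor
  · intro h mn hmn
    have := h mn hmn; simpa using this
  · intro h mn hmn
    simpa using h mn hmn

theorem pv_pred2_eq (S : List (String × String)) (ab : String × String) :
    S.all (fun xy => !(PySem.Str.isIn xy.1 ab.1) || (xy == ab))
      = pvMatchesOnly (pvBuildPairs S) ab.1 ab := by
  rw [Bool.eq_iff_iff, List.all_eq_true, pv_matchesOnly_iff]
  constructor
  · intro h xy hxy hin
    have h2 := h xy hxy
    rw [Bool.or_eq_true] at h2
    rcases h2 with hc | hc
    · rw [Bool.not_eq_true'] at hc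
      rw [hc] at hin
      exact absurd hin (by simp)
    · simpa using hc
  · intro h xy hxy
    by_cases hin : PySem.Str.isIn xy.1 ab.1 = true
    · have := h xy hxy hin
      rw [this]
      simp
    · rw [Bool.or_eq_true, Bool.not_eq_true']
      exact Or.inl (Bool.eq_false_iff.mpr hin)

-- set-fold bookkeeping shared by the stage proofs
theorem pv_foldl_condAdd {α : Type} [BEq α] (p : α → Bool) (s : PySem.Set α) (l : List α) :
    List.foldl (fun s x => if p x then PySem.Set.add s x else s) s l
      = PySem.Set.update s (l.filter p) := by
  induction l generalizing s with
  | nil => rfl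
  | cons x l ih =>
    by_cases h : p x = true <;> simp [h, ih, PySem.Set.update]

theorem pv_ofList_snoc {α : Type} [BEq α] (l : List α) (x : α) :
    PySem.Set.ofList (l ++ [x]) = PySem.Set.add (PySem.Set.ofList l) x := by
  rw [PySem.Set.ofList_eq_foldl, PySem.Set.ofList_eq_foldl, List.foldl_append]
  rfl

theorem pv_update_snoc {α : Type} [BEq α] (s : PySem.Set α) (l : List α) (x : α) :
    PySem.Set.update s (l ++ [x]) = PySem.Set.add (PySem.Set.update s l) x := by
  show List.foldl PySem.Set.add s (l ++ [x]) = _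
  rw [List.foldl_append]
  rfl

theorem pv_update_ofList {α : Type} [BEq α] [LawfulBEq α] (s : PySem.Set α) (l : List α) :
    PySem.Set.update s (PySem.Set.ofList l) = PySem.Set.update s l := by
  induction l using List.reverseRecOn with
  | nil => rfl
  | append_singleton l x ih =>
    rw [pv_ofList_snoc, pv_update_snoc]
    by_cases h : x ∈ l
    · rw [PySem.Set.add_of_mem ((PySem.Set.mem_ofList l x).mpr h), ih,
        PySem.Set.add_of_mem ((PySem.Set.mem_update s l x).mpr (Or.inr h))]
    · rw [PySem.Set.add_of_not_mem (fun hc => h ((PySem.Set.mem_ofList l x).mp hc)),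
        pv_update_snoc, ih]

theorem pv_filter_ofList {α : Type} [BEq α] [LawfulBEq α] (p : α → Bool) (l : List α) :
    (PySem.Set.ofList l).filter p = PySem.Set.ofList (l.filter p) := by
  induction l using List.reverseRecOn with
  | nil => rfl
  | append_singleton l x ih =>
    rw [pv_ofList_snoc, List.filter_append]
    by_cases h : x ∈ l
    · rw [PySem.Set.add_of_mem ((PySem.Set.mem_ofList l x).mpr h), ih]
      by_cases hp : p x = true
      · simp only [List.filter_cons, List.filter_nil, hp, if_pos]
        rw [pv_ofList_snoc, PySem.Set.add_of_mem
          ((PySem.Set.mem_ofList _ x).mpr (List.mem_filter.mpr ⟨h, hp⟩))]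
      · simp [hp]
    · rw [PySem.Set.add_of_not_mem (fun hc => h ((PySem.Set.mem_ofList l x).mp hc)),
        List.filter_append, ih]
      by_cases hp : p x = true
      · simp only [List.filter_cons, List.filter_nil, hp, if_pos]
        rw [pv_ofList_snoc, PySem.Set.add_of_not_mem
          (fun hc => h (List.mem_filter.mp ((PySem.Set.mem_ofList _ x).mp hc)).1)]
      · simp [hp]

-- proof-only abbreviations for the stages of the two pipelines
def pvCandFn (ab : String × String) (i : Int) : String × String :=
  (pvCat (PySem.Str.slice ab.1 (some i) none)
         (pvInverse (PySem.Str.slice ab.2 (some (PySem.Str.len ab.2 - i)) none)),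
   pvCat (pvInverse (PySem.Str.slice ab.1 none (some i)))
         (PySem.Str.slice ab.2 none (some (PySem.Str.len ab.2 - i))))

def pvSA (R : PySem.Set (String × String)) : PySem.Set (String × String) :=
  R.foldl (fun s ab =>
    List.foldl (fun s xy => if R.all (fun mn => !(PySem.Str.isIn mn.1 xy.1)) then PySem.Set.add s xy else s)
      s (PySem.Set.ofList ((PySem.List.pyRange 0 (PySem.Str.len ab.1)).map (pvCandFn ab))))
    PySem.Set.empty

def pvSB (R : PySem.Set (String × String)) : PySem.Set (String × String) :=
  R.foldl (fun s ab =>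
    List.foldl (fun s i =>
        if !(pvOccurs (pvBuildFirsts R) (pvCandFn ab i).1)
        then PySem.Set.add s (pvCandFn ab i) else s)
      s (PySem.List.pyRange 0 (PySem.Str.len ab.1)))
    PySem.Set.empty

def pvKeepA (S : PySem.Set (String × String)) : PySem.Set (String × String) :=
  PySem.Set.ofList (S.filter (fun ab => S.all (fun xy => !(PySem.Str.isIn xy.1 ab.1) || (xy == ab))))

def pvKeepB (S : PySem.Set (String × String)) : PySem.Set (String × String) :=
  S.foldl (fun k ab =>
    if pvMatchesOnly (pvBuildPairs S) ab.1 ab then PySem.Set.add k ab else k)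
    PySem.Set.empty

def pvFinish (R K : PySem.Set (String × String)) : List (String × String) :=
  let R2 := PySem.Set.union R K
  let R3 := PySem.Set.union R2 (PySem.Set.ofList (R2.map (fun ab => (pvInverse ab.1, pvInverse ab.2))))
  PySem.Set.union R3 (PySem.Set.ofList (R3.map (fun ab => (ab.2, ab.1))))

theorem pv_S_eq (R : PySem.Set (String × String)) : pvSA R = pvSB R := by
  unfold pvSA pvSB
  have h : ∀ (s : PySem.Set (String × String)) (ab : String × String),
      List.foldl (fun s xy => if R.all (fun mn => !(PySem.Str.isIn mn.1 xy.1)) then PySem.Set.add s xy else s)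
        s (PySem.Set.ofList ((PySem.List.pyRange 0 (PySem.Str.len ab.1)).map (pvCandFn ab)))
      = List.foldl (fun s i =>
          if !(pvOccurs (pvBuildFirsts R) (pvCandFn ab i).1)
          then PySem.Set.add s (pvCandFn ab i) else s)
        s (PySem.List.pyRange 0 (PySem.Str.len ab.1)) := by
    intro s ab
    conv_rhs => rw [← List.foldl_map (f := pvCandFn ab)
      (g := fun s xy => if !(pvOccurs (pvBuildFirsts R) xy.1)
                        then PySem.Set.add s xy else s)]
    rw [pv_foldl_condAdd, pv_foldl_condAdd, pv_filter_ofList, pv_update_ofList]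
    congr 1
    exact List.filter_congr (fun xy _ => pv_pred1_eq R xy.1)
  exact congrFun (congrArg (fun f => List.foldl f PySem.Set.empty)
    (funext fun s => funext fun ab => h s ab)) R

theorem pv_keep_eq (S : PySem.Set (String × String)) : pvKeepA S = pvKeepB S := by
  unfold pvKeepA pvKeepB
  rw [show (PySem.Set.empty : PySem.Set (String × String)) = [] from rfl,
    pv_foldl_condAdd, PySem.Set.update_nil_left]
  congr 1
  exact List.filter_congr (fun ab _ => pv_pred2_eq S ab)

-- ===== VERDICT (by name: the statement is the Claim_ definition above) =====
theorem shuffle_relators_spec : Claim_equal_shuffle_relators := by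
  intro relators _
  show shuffle_relators relators = shuffle_relators_alt relators
  have hA : shuffle_relators relators
      = pvFinish (PySem.Set.ofList relators) (pvKeepA (pvSA (PySem.Set.ofList relators))) := rfl
  have hB : shuffle_relators_alt relators
      = pvFinish (PySem.Set.ofList relators) (pvKeepB (pvSB (PySem.Set.ofList relators))) := rfl
  rw [hA, hB, pv_S_eq, pv_keep_eq]
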